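-- pv_equiv track=rewrite | github.com/labuwx/progpuzzles | advent_of_code/2020/24/24.py | parse_dir
-- ===== SOURCE A (Python) =====
-- dirs = {
--     'ne': (1, 0),
--     'se': (0, 1),
--     'e': (1, 1),
--     'sw': (-1, 0),
--     'nw': (0, -1),
--     'w': (-1, -1),
-- }
--
-- def parse_dir(l):
--     curr_dir = ''
--     path = []
--     for c in l:
--         curr_dir += c
--         if curr_dir in dirs:
--             path.append(dirs[curr_dir])
--             curr_dir = ''
--     assert curr_dir == ''
--     return path
-- ===== SOURCE B (Python) =====
-- dirs = {
--     'ne': (1, 0),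
--     'se': (0, 1),
--     'e': (1, 1),
--     'sw': (-1, 0),
--     'nw': (0, -1),
--     'w': (-1, -1),
-- }
--
-- def parse_dir(l):
--     path = []
--     i = 0
--     while i < len(l):
--         if l[i] in ('n', 's'):
--             tok = l[i:i+2]
--             i += 2
--         else:
--             tok = l[i]
--             i += 1
--         assert tok in dirs
--         path.append(dirs[tok])
--     return path
-- ===== Notes on version B (the rewrite author's own statement) =====
-- stated objective: alternative
-- what changed: replaces A's grow-a-buffer scan (append each char to curr_dir, test membership, reset) by an index-based lookahead loop that decides the token length from the first character ('n'/'s' means a 2-char token) and slices it out directly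
import Mathlib
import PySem

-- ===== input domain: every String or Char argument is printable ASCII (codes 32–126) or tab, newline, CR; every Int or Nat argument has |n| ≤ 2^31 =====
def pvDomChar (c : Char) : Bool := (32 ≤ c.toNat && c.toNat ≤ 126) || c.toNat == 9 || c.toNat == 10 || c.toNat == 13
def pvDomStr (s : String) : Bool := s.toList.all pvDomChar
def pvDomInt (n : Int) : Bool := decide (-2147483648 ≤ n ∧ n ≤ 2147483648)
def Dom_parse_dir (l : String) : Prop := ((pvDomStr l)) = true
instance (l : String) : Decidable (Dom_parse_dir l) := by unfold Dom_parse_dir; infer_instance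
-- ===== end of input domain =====

-- B replaces A's grow-a-buffer scan (append each char, test dict membership, reset) by an
-- index-based lookahead loop that decides the token length from its first character;
-- alternative decomposition, same O(n) cost.

-- the module-level dict `dirs`, keyed by the token's character list
def dirsL : PySem.Dict (List Char) (Int × Int) :=
  PySem.Dict.ofList
    [(['n','e'], ((1 : Int), (0 : Int))), (['s','e'], (0, 1)), (['e'], (1, 1)),
     (['s','w'], (-1, 0)), (['n','w'], (0, -1)), (['w'], (-1, -1))]

-- ===== PORT A =====
-- loop body: curr_dir += c; if curr_dir in dirs: path.append(dirs[curr_dir]); curr_dir = ''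
def stepA (st : List Char × List (Int × Int)) (c : Char) : List Char × List (Int × Int) :=
  let curr := st.1 ++ [c]
  match PySem.Dict.get? dirsL curr with
  | some v => ([], st.2 ++ [v])
  | none => (curr, st.2)

def parse_dir (l : String) : List (Int × Int) :=
  -- `assert curr_dir == ''` raises exactly outside Pre_parse_dir; the returned value is path
  (l.toList.foldl stepA ([], [])).2

-- ===== PORT B =====
-- Source B's index loop over l[i:], transcribed as recursion on the suffix; tok = l[i:i+2] is `take 2`.
-- Where Source B's assert fails (token not in dirs) Python raises: excluded by Pre_, the port stops.
def goB : List Char → List (Int × Int)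
  | [] => []
  | c :: rest =>
    if c = 'n' || c = 's' then
      match PySem.Dict.get? dirsL ((c :: rest).take 2) with
      | some v => v :: goB (rest.drop 1)
      | none => []
    else
      match PySem.Dict.get? dirsL [c] with
      | some v => v :: goB rest
      | none => []
  termination_by l => l.length
  decreasing_by all_goals simp

def parse_dir_alt (l : String) : List (Int × Int) := goB l.toList

-- ===== PRECONDITION & SPEC =====
-- Pre_: the well-formed direction strings (a concatenation of tokens ne/se/e/sw/nw/w).
-- On every other string BOTH A and B raise AssertionError, so no returned value is excluded.
def okDir : List Char → Bool
  | [] => true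
  | 'e' :: r => okDir r
  | 'w' :: r => okDir r
  | 'n' :: c :: r => (c = 'e' || c = 'w') && okDir r
  | 's' :: c :: r => (c = 'e' || c = 'w') && okDir r
  | _ => false

def Pre_parse_dir (l : String) : Prop := okDir l.toList = true
instance (l : String) : Decidable (Pre_parse_dir l) := by unfold Pre_parse_dir; infer_instance
def pvWitness_parse_dir : String := "nesewnwsw"

def Spec_parse_dir (l : String) (out : List (Int × Int)) : Prop := out = parse_dir_alt l
instance (l : String) (out : List (Int × Int)) : Decidable (Spec_parse_dir l out) := by unfold Spec_parse_dir; infer_instance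

-- ===== CLAIM (what is proved, stated in full; the proofs are below) =====
def Claim_equal_parse_dir : Prop := ∀ (l : String), Dom_parse_dir l → Pre_parse_dir l → Spec_parse_dir l (parse_dir l)

-- ===== LEMMAS AND PROOFS =====
theorem gE : PySem.Dict.get? dirsL ['e'] = some (1, 1) := rfl
theorem gW : PySem.Dict.get? dirsL ['w'] = some (-1, -1) := rfl
theorem gN : PySem.Dict.get? dirsL ['n'] = none := rfl
theorem gS : PySem.Dict.get? dirsL ['s'] = none := rfl
theorem gNE : PySem.Dict.get? dirsL ['n','e'] = some (1, 0) := rfl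
theorem gNW : PySem.Dict.get? dirsL ['n','w'] = some (0, -1) := rfl
theorem gSE : PySem.Dict.get? dirsL ['s','e'] = some (0, 1) := rfl
theorem gSW : PySem.Dict.get? dirsL ['s','w'] = some (-1, 0) := rfl

-- loop invariant: on a well-formed suffix, A's fold starts and ends with an empty buffer
-- and appends exactly B's tokens
theorem foldA_ok (r : List Char) (acc : List (Int × Int)) (h : okDir r = true) :
    List.foldl stepA ([], acc) r = ([], acc ++ goB r) := by
  induction r using okDir.induct generalizing acc with
  | case1 => simp [goB]
  | case2 r ih =>
      simp only [okDir] at h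
      simp [List.foldl_cons, stepA, gE, goB, ih _ h]
  | case3 r ih =>
      simp only [okDir] at h
      simp [List.foldl_cons, stepA, gW, goB, ih _ h]
  | case4 c r ih =>
      simp only [okDir, Bool.and_eq_true, Bool.or_eq_true, decide_eq_true_eq] at h
      obtain ⟨hc, hr⟩ := h
      rcases hc with hc | hc <;> subst hc
      · simp [List.foldl_cons, stepA, gN, gNE, goB, ih _ hr]
      · simp [List.foldl_cons, stepA, gN, gNW, goB, ih _ hr]
  | case5 c r ih =>
      simp only [okDir, Bool.and_eq_true, Bool.or_eq_true, decide_eq_true_eq] at h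
      obtain ⟨hc, hr⟩ := h
      rcases hc with hc | hc <;> subst hc
      · simp [List.foldl_cons, stepA, gS, gSE, goB, ih _ hr]
      · simp [List.foldl_cons, stepA, gS, gSW, goB, ih _ hr]
  | case6 x =>
      simp [okDir] at h

-- ===== VERDICT (by name: the statement is the Claim_ definition above) =====
theorem parse_dir_spec : Claim_equal_parse_dir := by
  intro l _ hpre
  unfold Spec_parse_dir parse_dir parse_dir_alt
  rw [foldA_ok _ _ hpre]
  simp
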